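-- pv_equiv track=rewrite | github.com/minseunghwang/TIL | programmers/[1차]비밀지도.py | solution
-- ===== SOURCE A (Python) =====
-- def solution(n, arr1, arr2):
--     answer = []
--     for i,j in zip(arr1,arr2):
--         a = str(format(i|j, 'b'))
--         a = a.rjust(n,'0')
--         a = a.replace('1','#').replace('0',' ')
--         answer.append(a)
--
--     return answer
-- ===== SOURCE B (Python) =====
-- def _bits(v):
--     """Binary digits of v, rendered as '#' for 1 and ' ' for 0, most significant first."""
--     if v < 0:
--         return '-' + _bits(-v)
--     if v < 2:
--         return '#' if v else ' '
--     return _bits(v >> 1) + ('#' if v & 1 else ' ')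
--
--
-- def solution(n, arr1, arr2):
--     return [_bits(i | j).rjust(n) for i, j in zip(arr1, arr2)]
-- ===== Notes on version B (the rewrite author's own statement) =====
-- stated objective: alternative
-- what changed: B replaces A's string pipeline (format to binary text, rjust with '0', two character replaces) by a hand-written recursive int-to-binary converter that emits '#'/' ' glyphs directly while halving the value, followed by a plain space-padding rjust.
import Mathlib
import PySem

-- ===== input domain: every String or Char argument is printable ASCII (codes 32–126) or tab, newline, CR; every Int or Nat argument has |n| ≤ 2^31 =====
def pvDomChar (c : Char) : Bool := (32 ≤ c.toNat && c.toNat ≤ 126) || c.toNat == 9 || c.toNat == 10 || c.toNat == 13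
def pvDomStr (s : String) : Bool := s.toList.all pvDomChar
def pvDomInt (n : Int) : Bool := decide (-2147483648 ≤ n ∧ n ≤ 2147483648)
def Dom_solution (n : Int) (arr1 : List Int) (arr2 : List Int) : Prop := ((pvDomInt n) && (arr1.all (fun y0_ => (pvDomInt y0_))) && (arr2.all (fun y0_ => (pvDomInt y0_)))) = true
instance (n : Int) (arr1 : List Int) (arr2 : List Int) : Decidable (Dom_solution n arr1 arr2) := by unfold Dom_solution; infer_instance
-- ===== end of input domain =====

-- B replaces A's format/rjust('0')/replace pipeline by a recursive int-to-binary converter emitting '#'/' ' directly, plus a space-padding rjust; same cost, different decomposition.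


-- ===== PORT A =====
-- str.rjust(n, c): left-pad to width n (no-op when n ≤ len); exact, ported by hand (PySem has no rjust)
def pyRjust (s : List Char) (n : Int) (c : Char) : List Char :=
  List.replicate (n.toNat - s.length) c ++ s

-- loop body of A, on code points (strings handled as their lists of chars; String.ofList at the end)
def rowA (n : Int) (i j : Int) : String :=
  let a := PySem.Int.toBinChars (PySem.Int.bor i j)            -- str(format(i|j, 'b'))
  let a := pyRjust a n '0'                                      -- a.rjust(n, '0')
  let a := PySem.Chars.replace a ['1'] ['#']                    -- a.replace('1','#')
  let a := PySem.Chars.replace a ['0'] [' ']                    -- .replace('0',' ')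
  String.ofList a

def solution (n : Int) (arr1 : List Int) (arr2 : List Int) : List String :=
  (arr1.zip arr2).foldl (fun answer ij => answer ++ [rowA n ij.1 ij.2]) []

-- ===== PORT B =====
-- Source B's _bits: recursive binary conversion, emitting '#' for a 1 bit and ' ' for a 0 bit
def bitsB (v : Int) : List Char :=
  if v < 0 then '-' :: bitsB (-v)
  else if v < 2 then [if v = 0 then ' ' else '#']               -- '#' if v else ' '
  else bitsB (v >>> (1 : Nat)) ++ [if PySem.Int.band v 1 = 1 then '#' else ' ']
termination_by (2 * v.natAbs + (if v < 0 then 1 else 0) : Nat)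
decreasing_by
  · rename_i h
    have hnn : ¬ (-v < 0) := by omega
    simp only [Int.natAbs_neg, if_neg hnn, if_pos h]
    omega
  · rename_i h1 h2
    rw [Int.shiftRight_eq_div_pow, pow_one]
    simp only [Nat.cast_ofNat]
    have hnn : ¬ (v / 2 < 0) := by omega
    rw [if_neg hnn, if_neg h1]
    omega

def rowB (n : Int) (v : Int) : String :=
  String.ofList (pyRjust (bitsB v) n ' ')                       -- _bits(v).rjust(n)

def solution_alt (n : Int) (arr1 : List Int) (arr2 : List Int) : List String :=
  (arr1.zip arr2).map (fun ij => rowB n (PySem.Int.bor ij.1 ij.2))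

-- ===== PRECONDITION & SPEC =====
def Spec_solution (n : Int) (arr1 : List Int) (arr2 : List Int) (out : List String) : Prop := out = solution_alt n arr1 arr2
instance (n : Int) (arr1 : List Int) (arr2 : List Int) (out : List String) : Decidable (Spec_solution n arr1 arr2 out) := by unfold Spec_solution; infer_instance

-- ===== CLAIM (what is proved, stated in full; the proofs are below) =====
def Claim_equal_solution : Prop := ∀ (n : Int) (arr1 : List Int) (arr2 : List Int), Dom_solution n arr1 arr2 → Spec_solution n arr1 arr2 (solution n arr1 arr2)

-- ===== LEMMAS AND PROOFS =====

-- the composed effect of A's two replaces, per character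
def repFn (c : Char) : Char := if c = '1' then '#' else if c = '0' then ' ' else c

-- single-character replace is a map
theorem replace_go_single (c d : Char) :
    ∀ (fuel : Nat) (l acc : List Char), l.length ≤ fuel →
      PySem.Chars.replace.go [c] [d] fuel l acc =
        acc.reverse ++ l.map (fun x => if x = c then d else x) := by
  intro fuel
  induction fuel with
  | zero => intro l acc h; interval_cases hl : l.length; · simp_all [PySem.Chars.replace.go, List.length_eq_zero_iff.mp hl]
  | succ fuel ih =>
    intro l acc h
    cases l with
    | nil => simp [PySem.Chars.replace.go]
    | cons x t =>
      simp only [PySem.Chars.replace.go, List.isPrefixOf, List.map]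
      by_cases hx : x = c
      · simp [hx, ih t (d :: acc) (by simpa using h)]
      · have : (c == x) = false := by simp [Ne.symm hx]
        simp [this, hx, ih t (x :: acc) (by simpa using h)]

theorem replace_single (c d : Char) (l : List Char) :
    PySem.Chars.replace l [c] [d] = l.map (fun x => if x = c then d else x) := by
  rw [PySem.Chars.replace]
  simp [replace_go_single c d l.length l [] le_rfl]

-- MSB-first binary digits, the shape Nat.toDigitsCore unfolds to
def binT (m : Nat) : List Char :=
  if m / 2 = 0 then [(m % 2).digitChar] else binT (m / 2) ++ [(m % 2).digitChar]
decreasing_by omega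

theorem toDigitsCore_eq_binT :
    ∀ (fuel n : Nat) (ds : List Char), n ≤ fuel →
      Nat.toDigitsCore 2 (fuel + 1) n ds = binT n ++ ds := by
  intro fuel
  induction fuel with
  | zero =>
    intro n ds h
    have : n = 0 := by omega
    subst this
    simp [Nat.toDigitsCore, binT]
  | succ fuel ih =>
    intro n ds h
    rw [Nat.toDigitsCore]
    by_cases h2 : n / 2 = 0
    · simp [h2, binT]
    · simp only [if_neg h2]
      rw [ih (n / 2) _ (by omega)]
      conv_rhs => rw [binT]
      simp [h2, List.append_assoc]

theorem toDigits_eq_binT (n : Nat) : Nat.toDigits 2 n = binT n := by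
  rw [Nat.toDigits, toDigitsCore_eq_binT n n [] le_rfl, List.append_nil]

-- B's recursive converter on a nonnegative value is A's digit string through the replaces
theorem bitsB_nat (m : Nat) : bitsB ((m : Nat) : Int) = (binT m).map repFn := by
  induction m using Nat.strong_induction_on with
  | _ m ih =>
    by_cases h2 : m / 2 = 0
    · have hm : m = 0 ∨ m = 1 := by omega
      rcases hm with h | h <;> subst h <;> rw [bitsB, binT] <;> decide
    · have hge : ¬ ((m : Int) < 2) := by omega
      have hneg : ¬ ((m : Int) < 0) := by omega
      rw [bitsB, if_neg hneg, if_neg hge]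
      have hsh : ((m : Int) >>> (1 : Nat)) = (((m / 2 : Nat) : Nat) : Int) := by
        rw [← Int.natCast_shiftRight, Nat.shiftRight_one]
      have hband : PySem.Int.band (m : Int) 1 = (((m &&& 1 : Nat) : Nat) : Int) := by
        exact_mod_cast PySem.Int.band_natCast m 1
      have hlast : (if PySem.Int.band (m : Int) 1 = 1 then '#' else ' ')
          = repFn ((m % 2).digitChar) := by
        rw [hband, Nat.and_one_is_mod]
        rcases Nat.mod_two_eq_zero_or_one m with h0 | h0 <;>
          simp [h0, repFn, Nat.digitChar]
      rw [hsh, ih (m / 2) (by omega), hlast]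
      conv_rhs => rw [binT]
      rw [if_neg h2, List.map_append, List.map_cons, List.map_nil]

-- B's converter equals A's format(v,'b') string through the replaces, for every v
theorem bitsB_eq (v : Int) : bitsB v = (PySem.Int.toBinChars v).map repFn := by
  by_cases hneg : v < 0
  · have habs : -v = ((v.natAbs : Nat) : Int) := by omega
    rw [bitsB, if_pos hneg, habs, bitsB_nat, PySem.Int.toBinChars, if_pos hneg,
        toDigits_eq_binT, List.map_cons, show repFn '-' = '-' from rfl]
  · have habs : v = ((v.toNat : Nat) : Int) := by omega
    rw [PySem.Int.toBinChars, if_neg hneg, toDigits_eq_binT]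
    conv_lhs => rw [habs]
    rw [bitsB_nat]

theorem row_eq (n i j : Int) : rowA n i j = rowB n (PySem.Int.bor i j) := by
  unfold rowA rowB
  dsimp only
  rw [replace_single, replace_single, List.map_map]
  have hcomp : ((fun x => if x = '0' then ' ' else x) ∘ (fun x => if x = '1' then '#' else x)) = repFn := by
    funext x
    by_cases h1 : x = '1' <;> by_cases h0 : x = '0' <;> simp_all [repFn]
  rw [hcomp, pyRjust, pyRjust, List.map_append, List.map_replicate,
      show repFn '0' = ' ' from rfl, bitsB_eq, List.length_map]

theorem foldl_append_map_rows {α β : Type} (f : α → β) (l : List α) (acc : List β) :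
    l.foldl (fun a x => a ++ [f x]) acc = acc ++ l.map f := by
  induction l generalizing acc with
  | nil => simp
  | cons x xs ih => simp [List.foldl, ih]

-- ===== VERDICT (by name: the statement is the Claim_ definition above) =====
theorem solution_spec : Claim_equal_solution := by
  intro n arr1 arr2 _
  show solution n arr1 arr2 = solution_alt n arr1 arr2
  unfold solution solution_alt
  rw [foldl_append_map_rows]
  simp only [List.nil_append, row_eq]
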